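-- pv_equiv track=rewrite | github.com/carlosfranzreb/myclimbz | tests/test_analysis.py | remove_trailing
-- ===== SOURCE A (Python) =====
-- def remove_trailing(data: dict) -> dict:
--     """
--     Remove the trailing keys that have no climbs.
--     """
--     for idx in range(2):
--         keys = list(data.keys())
--         if idx == 1:
--             keys = list(reversed(keys))
--         for key in keys:
--             if data[key] > 0:
--                 break
--             del data[key]
--     return data
-- ===== SOURCE B (Python) =====
-- def remove_trailing(data: dict) -> dict:
--     """
--     Remove the trailing keys that have no climbs.
--     """
--     keys = list(data.keys())
--     n = len(keys)
--     i = 0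
--     while i < n and data[keys[i]] <= 0:
--         i += 1
--     j = n
--     while j > i and data[keys[j - 1]] <= 0:
--         j -= 1
--     for key in keys[:i] + keys[j:]:
--         del data[key]
--     return data
-- ===== Notes on version B (the rewrite author's own statement) =====
-- stated objective: alternative
-- what changed: A deletes keys one by one while scanning the dict twice (re-listing the keys between passes); B takes the key list once, locates the first and last positive entries with two index scans, then deletes the leading and trailing key slices in one batch.
import Mathlib
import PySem

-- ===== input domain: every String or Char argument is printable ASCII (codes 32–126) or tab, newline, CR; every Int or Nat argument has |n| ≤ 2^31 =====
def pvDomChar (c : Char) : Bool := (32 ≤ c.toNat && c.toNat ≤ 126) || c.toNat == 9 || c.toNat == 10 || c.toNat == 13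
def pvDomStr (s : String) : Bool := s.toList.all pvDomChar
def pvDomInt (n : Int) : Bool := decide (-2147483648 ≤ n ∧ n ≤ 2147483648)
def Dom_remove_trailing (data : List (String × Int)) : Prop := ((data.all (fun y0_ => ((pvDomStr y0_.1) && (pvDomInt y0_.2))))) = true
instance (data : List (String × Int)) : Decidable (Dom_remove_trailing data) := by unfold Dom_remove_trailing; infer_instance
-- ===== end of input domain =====

-- B replaces A's delete-while-scanning double pass by two index scans (first and last
-- positive entry) followed by one batch deletion of the leading/trailing key slices
-- (objective: alternative decomposition, same cost). Both A and B mutate the dict in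
-- place in Python; the equivalence proved here is about the returned mapping.

-- ===== PORT A =====
-- one pass of A's inner loop: walk `keys`, deleting until the first key with value > 0
def pvDelPassA : List (String × Int) → List String → List (String × Int)
  | d, [] => d
  | d, k :: ks =>
    if (PySem.Dict.mk d).getD k 0 > 0 then d
    else pvDelPassA ((PySem.Dict.mk d).erase k).items ks

-- the `for idx in range(2)` loop unrolled: idx = 0 (keys in order), idx = 1 (keys reversed)
def remove_trailing (data : List (String × Int)) : List (String × Int) :=
  let d1 := pvDelPassA data (data.map Prod.fst)
  pvDelPassA d1 ((d1.map Prod.fst).reverse)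

-- ===== PORT B =====
-- `while i < n and data[keys[i]] <= 0: i += 1`
def pvScanFwd (d : PySem.Dict String Int) (keys : List String) (i : Nat) : Nat :=
  if h : i < keys.length then
    if d.getD keys[i] 0 ≤ 0 then pvScanFwd d keys (i + 1) else i
  else i
termination_by keys.length - i

-- `while j > i and data[keys[j-1]] <= 0: j -= 1`
def pvScanBack (d : PySem.Dict String Int) (keys : List String) (i j : Nat) : Nat :=
  if _h : i < j then
    if d.getD (keys.getD (j - 1) "") 0 ≤ 0 then pvScanBack d keys i (j - 1) else j
  else j
termination_by j
decreasing_by omega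

def remove_trailing_alt (data : List (String × Int)) : List (String × Int) :=
  let keys := data.map Prod.fst
  let n := keys.length
  let i := pvScanFwd (PySem.Dict.mk data) keys 0
  let j := pvScanBack (PySem.Dict.mk data) keys i n
  (((keys.take i) ++ (keys.drop j)).foldl (fun d k => d.erase k) (PySem.Dict.mk data)).items

-- ===== PRECONDITION & SPEC =====
-- Pre_ only rules out association lists with a repeated key: A's parameter is a Python
-- dict, whose keys are necessarily distinct, so such lists represent no dict input at all.
def Pre_remove_trailing (data : List (String × Int)) : Prop := (data.map Prod.fst).Nodup
instance (data : List (String × Int)) : Decidable (Pre_remove_trailing data) := by unfold Pre_remove_trailing; infer_instance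
def pvWitness_remove_trailing : (List (String × Int)) := [("a", 0), ("b", 2), ("c", 0)]
def Spec_remove_trailing (data : List (String × Int)) (out : List (String × Int)) : Prop := out = remove_trailing_alt data
instance (data : List (String × Int)) (out : List (String × Int)) : Decidable (Spec_remove_trailing data out) := by unfold Spec_remove_trailing; infer_instance

-- ===== CLAIM (what is proved, stated in full; the proofs are below) =====
def Claim_equal_remove_trailing : Prop := ∀ (data : List (String × Int)), Dom_remove_trailing data → Pre_remove_trailing data → Spec_remove_trailing data (remove_trailing data)

-- ===== LEMMAS AND PROOFS =====

-- the trimming predicate: entries with no climbs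
def pvQ : String × Int → Bool := fun x => decide (x.2 ≤ 0)

theorem pv_get?_append_not_mem (pre rest : List (String × Int)) (k : String)
    (hk : k ∉ pre.map Prod.fst) :
    (PySem.Dict.mk (pre ++ rest)).get? k = (PySem.Dict.mk rest).get? k := by
  induction pre with
  | nil => rfl
  | cons p pre ih =>
    obtain ⟨a, b⟩ := p
    simp only [List.map_cons, List.mem_cons, not_or] at hk
    simp only [List.cons_append, PySem.Dict.get?_mk_cons]
    rw [if_neg (by simpa using fun e => hk.1 (Eq.symm e))]
    exact ih hk.2

theorem pv_filter_ne_self (l : List (String × Int)) (k : String)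
    (hk : k ∉ l.map Prod.fst) : l.filter (fun p => !(p.1 == k)) = l := by
  rw [List.filter_eq_self]
  intro p hp
  simp only [Bool.not_eq_eq_eq_not, Bool.not_true, beq_eq_false_iff_ne, ne_eq]
  exact fun e => hk (by simpa [e] using List.mem_map_of_mem (f := Prod.fst) hp)

theorem pv_getD_idx (data : List (String × Int)) (hnd : (data.map Prod.fst).Nodup)
    (i : Nat) (h : i < data.length) (h2 : i < (data.map Prod.fst).length) :
    (PySem.Dict.mk data).getD ((data.map Prod.fst)[i]'h2) 0 = (data[i]'h).2 := by
  induction data generalizing i with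
  | nil => simp at h
  | cons p rest ih =>
    obtain ⟨a, b⟩ := p
    simp only [List.map_cons, List.nodup_cons] at hnd
    match i with
    | 0 => simp [PySem.Dict.getD, PySem.Dict.get?_mk_cons]
    | Nat.succ i' =>
      have h' : i' < rest.length := by simpa using h
      have h2' : i' < (rest.map Prod.fst).length := by simpa using h'
      have hmem2 : (rest[i']'h').1 ∈ rest.map Prod.fst := List.mem_map_of_mem (List.getElem_mem h')
      have hne : ¬ (a = (rest[i']'h').1) := fun e => hnd.1 (e ▸ hmem2)
      simp only [List.getElem_cons_succ, List.getElem_map]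
      rw [PySem.Dict.getD, PySem.Dict.get?_mk_cons, if_neg (by simpa using hne)]
      have := ih hnd.2 i' h' h2'
      simpa [PySem.Dict.getD, List.getElem_map] using this

theorem pv_passA_fwd (d : List (String × Int)) :
    (d.map Prod.fst).Nodup → pvDelPassA d (d.map Prod.fst) = d.dropWhile pvQ := by
  induction d with
  | nil => intro _; rfl
  | cons p rest ih =>
    intro hnd
    obtain ⟨a, b⟩ := p
    simp only [List.map_cons, List.nodup_cons] at hnd
    simp only [List.map_cons]
    rw [pvDelPassA]
    have hget : (PySem.Dict.mk ((a, b) :: rest)).getD a 0 = b := by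
      simp [PySem.Dict.getD, PySem.Dict.get?_mk_cons]
    rw [hget]
    by_cases hb : b > 0
    · rw [if_pos hb, List.dropWhile_cons]
      simp [pvQ, show ¬(b ≤ 0) by omega]
    · rw [if_neg hb]
      have herase : ((PySem.Dict.mk ((a, b) :: rest)).erase a).items = rest := by
        simp only [PySem.Dict.erase, List.filter_cons]
        simp only [beq_self_eq_true, Bool.not_true, Bool.false_eq_true, if_false]
        exact pv_filter_ne_self rest a hnd.1
      rw [herase, ih hnd.2, List.dropWhile_cons]
      simp [pvQ, show b ≤ 0 by omega]

theorem pv_passA_bwd (d : List (String × Int)) :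
    (d.map Prod.fst).Nodup →
    pvDelPassA d ((d.map Prod.fst).reverse) = (d.reverse.dropWhile pvQ).reverse := by
  induction d using List.reverseRecOn with
  | nil => intro _; rfl
  | append_singleton init p ih =>
    intro hnd
    obtain ⟨a, b⟩ := p
    have hnd' : (init.map Prod.fst).Nodup ∧ a ∉ init.map Prod.fst := by
      simp only [List.map_append, List.map_cons, List.map_nil, List.nodup_append] at hnd
      exact ⟨hnd.1, fun hm => (hnd.2.2 a hm a (by simp)) rfl⟩
    have hkeys : ((init ++ [(a, b)]).map Prod.fst).reverse
        = a :: (init.map Prod.fst).reverse := by simp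
    rw [hkeys, pvDelPassA]
    have hget : (PySem.Dict.mk (init ++ [(a, b)])).getD a 0 = b := by
      rw [PySem.Dict.getD, pv_get?_append_not_mem init [(a, b)] a hnd'.2]
      simp [PySem.Dict.get?_mk_cons]
    rw [hget]
    by_cases hb : b > 0
    · rw [if_pos hb, List.reverse_append]
      simp [pvQ, show ¬(b ≤ 0) by omega]
    · rw [if_neg hb]
      have herase : ((PySem.Dict.mk (init ++ [(a, b)])).erase a).items = init := by
        simp only [PySem.Dict.erase, List.filter_append]
        rw [pv_filter_ne_self init a hnd'.2]
        simp
      rw [herase, ih hnd'.1, List.reverse_append]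
      simp [pvQ, show b ≤ 0 by omega]

theorem pv_scanFwd_eq (data : List (String × Int)) (hnd : (data.map Prod.fst).Nodup) :
    ∀ fuel i, data.length - i ≤ fuel → i ≤ data.length →
    pvScanFwd (PySem.Dict.mk data) (data.map Prod.fst) i
      = i + ((data.drop i).takeWhile pvQ).length := by
  intro fuel
  induction fuel with
  | zero =>
    intro i hf hi
    have hlen : i = data.length := by omega
    rw [pvScanFwd, dif_neg (by simp [hlen])]
    simp [hlen, List.drop_length]
  | succ f ihf =>
    intro i hf hi
    rw [pvScanFwd]
    by_cases hlt : i < (data.map Prod.fst).length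
    · rw [dif_pos hlt]
      have hid : i < data.length := by simpa using hlt
      rw [pv_getD_idx data hnd i hid hlt]
      have hdrop : data.drop i = (data[i]'hid) :: data.drop (i + 1) :=
        List.drop_eq_getElem_cons hid
      by_cases hv : (data[i]'hid).2 ≤ 0
      · rw [if_pos hv, ihf (i + 1) (by omega) (by omega), hdrop, List.takeWhile_cons]
        rw [if_pos (by simp [pvQ, hv])]
        simp; omega
      · rw [if_neg hv, hdrop, List.takeWhile_cons, if_neg (by simp [pvQ, hv])]
        simp
    · rw [dif_neg hlt]
      have : i = data.length := by simp at hlt; omega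
      simp [this, List.drop_length]

theorem pv_scanBack_eq (data : List (String × Int)) (hnd : (data.map Prod.fst).Nodup) :
    ∀ fuel i j, j ≤ fuel → i ≤ j → j ≤ data.length →
    pvScanBack (PySem.Dict.mk data) (data.map Prod.fst) i j
      = i + (((data.drop i).take (j - i)).reverse.dropWhile pvQ).length := by
  intro fuel
  induction fuel with
  | zero =>
    intro i j hf hij hj
    have : j = 0 := by omega
    subst this
    have : i = 0 := by omega
    subst this
    rw [pvScanBack, dif_neg (by omega)]
    simp
  | succ f ihf =>
    intro i j hf hij hj
    rw [pvScanBack]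
    by_cases hlt : i < j
    · rw [dif_pos hlt]
      have hj1 : j - 1 < data.length := by omega
      have hj1' : j - 1 < (data.map Prod.fst).length := by simpa using hj1
      have hkey : (data.map Prod.fst).getD (j - 1) ""
          = (data.map Prod.fst)[j - 1]'hj1' := List.getD_eq_getElem _ _ hj1'
      rw [hkey, pv_getD_idx data hnd (j - 1) hj1 hj1']
      have hsl : j - 1 - i < (data.drop i).length := by
        simp [List.length_drop]; omega
      have hidx : i + (j - 1 - i) = j - 1 := by omega
      have hsel : (data.drop i)[j - 1 - i]'hsl = data[j - 1]'hj1 := by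
        simp [List.getElem_drop, hidx]
      have htake : (data.drop i).take (j - i)
          = (data.drop i).take (j - 1 - i) ++ [(data.drop i)[j - 1 - i]'hsl] := by
        have hji : j - i = (j - 1 - i) + 1 := by omega
        rw [hji, List.take_add_one, List.getElem?_eq_getElem hsl]
        simp
      by_cases hv : (data[j - 1]'hj1).2 ≤ 0
      · rw [if_pos hv, ihf i (j - 1) (by omega) (by omega) (by omega), htake,
          List.reverse_append]
        simp only [List.reverse_singleton, List.singleton_append, List.dropWhile_cons]
        rw [hsel, if_pos (by simp [pvQ, hv])]
      · rw [if_neg hv, htake, List.reverse_append]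
        simp only [List.reverse_singleton, List.singleton_append, List.dropWhile_cons]
        rw [hsel, if_neg (by simp [pvQ, hv])]
        simp only [List.length_cons, List.length_reverse, List.length_take,
          List.length_drop]
        omega
    · rw [dif_neg hlt]
      have : j = i := by omega
      subst this
      simp

theorem pv_erase_fold_prefix (a rest : List (String × Int)) :
    ((a ++ rest).map Prod.fst).Nodup →
    (a.map Prod.fst).foldl (fun d k => d.erase k) (PySem.Dict.mk (a ++ rest))
      = PySem.Dict.mk rest := by
  induction a with
  | nil => intro _; simp
  | cons p a' ih =>
    intro hnd
    obtain ⟨k, v⟩ := p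
    simp only [List.map_cons, List.cons_append, List.nodup_cons, List.map_append] at hnd
    simp only [List.map_cons, List.cons_append, List.foldl_cons]
    have hk : k ∉ (a' ++ rest).map Prod.fst := by
      simpa [List.map_append] using hnd.1
    have herase : (PySem.Dict.mk ((k, v) :: (a' ++ rest))).erase k
        = PySem.Dict.mk (a' ++ rest) := by
      simp only [PySem.Dict.erase, List.filter_cons]
      simp only [beq_self_eq_true, Bool.not_true, Bool.false_eq_true, if_false]
      rw [pv_filter_ne_self _ _ hk]
    rw [herase]
    exact ih (by simpa [List.map_append] using hnd.2)

theorem pv_erase_fold_suffix (m b : List (String × Int)) :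
    ((m ++ b).map Prod.fst).Nodup →
    (b.map Prod.fst).foldl (fun d k => d.erase k) (PySem.Dict.mk (m ++ b))
      = PySem.Dict.mk m := by
  induction b with
  | nil => intro _; simp
  | cons p b' ih =>
    intro hnd
    obtain ⟨k, v⟩ := p
    have hkm : k ∉ m.map Prod.fst := by
      simp only [List.map_append, List.map_cons, List.nodup_append, List.nodup_cons] at hnd
      exact fun hm => (hnd.2.2 k hm k (by simp)) rfl
    have hkb : k ∉ b'.map Prod.fst := by
      simp only [List.map_append, List.map_cons, List.nodup_append, List.nodup_cons] at hnd
      exact hnd.2.1.1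
    simp only [List.map_cons, List.foldl_cons]
    have herase : (PySem.Dict.mk (m ++ (k, v) :: b')).erase k
        = PySem.Dict.mk (m ++ b') := by
      simp only [PySem.Dict.erase, List.filter_append, List.filter_cons]
      simp only [beq_self_eq_true, Bool.not_true, Bool.false_eq_true, if_false]
      rw [pv_filter_ne_self _ _ hkm, pv_filter_ne_self _ _ hkb]
    rw [herase]
    apply ih
    have hsub : (m ++ b').Sublist (m ++ (k, v) :: b') :=
      List.Sublist.append_left (List.sublist_cons_self _ _) m
    exact List.Nodup.sublist (List.Sublist.map Prod.fst hsub) hnd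

theorem pv_main (data : List (String × Int)) (hnd : (data.map Prod.fst).Nodup) :
    remove_trailing data = remove_trailing_alt data := by
  unfold remove_trailing remove_trailing_alt
  simp only [List.length_map]
  rw [pv_passA_fwd data hnd]
  have hndm : ((data.dropWhile pvQ).map Prod.fst).Nodup :=
    List.Nodup.sublist (List.Sublist.map Prod.fst (List.dropWhile_sublist pvQ)) hnd
  rw [pv_passA_bwd _ hndm]
  have hlen : (data.takeWhile pvQ).length + (data.dropWhile pvQ).length = data.length := by
    have h := congrArg List.length (List.takeWhile_append_dropWhile (p := pvQ) (l := data))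
    simp only [List.length_append] at h
    exact h
  have hIle : (data.takeWhile pvQ).length ≤ data.length := by omega
  have hI := pv_scanFwd_eq data hnd data.length 0 (by omega) (by omega)
  rw [Nat.zero_add, List.drop_zero] at hI
  have hdropI : data.drop (data.takeWhile pvQ).length = data.dropWhile pvQ := by
    have h := congrArg (List.drop (data.takeWhile pvQ).length)
      (List.takeWhile_append_dropWhile (p := pvQ) (l := data))
    rw [List.drop_left] at h
    exact h.symm
  have hJ := pv_scanBack_eq data hnd data.length ((data.takeWhile pvQ).length)
    data.length (le_refl _) hIle (le_refl _)
  rw [hdropI] at hJ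
  have htk : (data.dropWhile pvQ).take (data.length - (data.takeWhile pvQ).length)
      = data.dropWhile pvQ := List.take_of_length_le (by omega)
  rw [htk] at hJ
  rw [hI, hJ, List.foldl_append, ← List.map_take]
  have h5a := pv_erase_fold_prefix (data.take (data.takeWhile pvQ).length)
    (data.drop (data.takeWhile pvQ).length) (by rw [List.take_append_drop]; exact hnd)
  rw [List.take_append_drop] at h5a
  rw [h5a, hdropI]
  have hkd : (data.map Prod.fst).drop
      ((data.takeWhile pvQ).length + ((data.dropWhile pvQ).reverse.dropWhile pvQ).length)
      = ((data.dropWhile pvQ).drop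
          ((data.dropWhile pvQ).reverse.dropWhile pvQ).length).map Prod.fst := by
    rw [← List.map_drop]
    congr 1
    rw [← hdropI, List.drop_drop, Nat.add_comm]
  rw [hkd]
  have hmnodup : (((data.dropWhile pvQ).take
        ((data.dropWhile pvQ).reverse.dropWhile pvQ).length
      ++ (data.dropWhile pvQ).drop
        ((data.dropWhile pvQ).reverse.dropWhile pvQ).length).map Prod.fst).Nodup := by
    rw [List.take_append_drop]; exact hndm
  have h5b := pv_erase_fold_suffix _ _ hmnodup
  rw [List.take_append_drop] at h5b
  rw [h5b]
  show ((data.dropWhile pvQ).reverse.dropWhile pvQ).reverse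
    = (data.dropWhile pvQ).take ((data.dropWhile pvQ).reverse.dropWhile pvQ).length
  have hm : data.dropWhile pvQ
      = ((data.dropWhile pvQ).reverse.dropWhile pvQ).reverse
        ++ ((data.dropWhile pvQ).reverse.takeWhile pvQ).reverse := by
    have h := congrArg List.reverse
      (List.takeWhile_append_dropWhile (p := pvQ) (l := (data.dropWhile pvQ).reverse))
    rw [List.reverse_append, List.reverse_reverse] at h
    exact h.symm
  conv_rhs => rw [hm]
  rw [List.take_left' (by simp)]

-- ===== VERDICT (by name: the statement is the Claim_ definition above) =====
theorem remove_trailing_spec : Claim_equal_remove_trailing := by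
  intro data _ hnd
  exact pv_main data hnd
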